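-- pv_equiv track=rewrite | github.com/ChineseResearcher/l33tc0d3-dump | dynamic_programming/Q3628 Maximum Number of Subsequences After One Inserting.py | numOfSubsequences
-- ===== SOURCE A (Python) =====
-- def numOfSubsequences(s: str) -> int:
--
--     # key ideas:
--     # 1) as we only care about "LCT" subsequences, process the string
--     # and update s to only contain "L", "C", "T"
--     # 2) we need to think greedily where it is the best to place an
--     # additional "L", "C" or "T"
--
--     ss = []
--     for c in s:
--         if c in ["L", "C", "T"]:
--             ss.append(c)
--
--     s = ''.join(ss)
--
--     # we design a helper to solve the dp problem of max. "LCT" subsequence cnt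
--     def f(s: str) -> int:
--
--         n = len(s)
--         # the design of the dp table is s.t.
--         # 1) dp[0][i] is the prefix count of "L" up to i
--         # 2) dp[1][i] is the subsequence count of "LC" up to i
--         # 3) dp[2][i] is the subsequence count of "LCT" up to i
--         dp = [ [0] * n for _ in range(3) ]
--
--         if s[0] == 'L':
--             dp[0][0] += 1
--
--         for i in range(1, n):
--             if s[i] == 'L':
--                 dp[0][i] = dp[0][i-1] + 1
--                 dp[1][i] = dp[1][i-1]
--                 dp[2][i] = dp[2][i-1]
--             elif s[i] == 'C':
--                 dp[0][i] = dp[0][i-1]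
--                 dp[1][i] = dp[1][i-1] + dp[0][i-1]
--                 dp[2][i] = dp[2][i-1]
--             elif s[i] == 'T':
--                 dp[0][i] = dp[0][i-1]
--                 dp[1][i] = dp[1][i-1]
--                 dp[2][i] = dp[2][i-1] + dp[1][i-1]
--
--         return dp
--
--     # case 1: additional L -> best at the front
--     aL = f('L' + s)[2][-1]
--
--     # case 2: additional T -> best at the back
--     aT = f(s + 'T')[2][-1]
--
--     # case 3: additional C -> best where combined count
--     # of 'L' to the left and 'T' to the right is max.
--     L_cnt, T_cnt = s.count('L'), 0
--
--     best_cnt, best_i = 0, -1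
--     for i in range(len(s)-1, -1, -1):
--         if s[i] == 'L':
--             L_cnt -= 1
--         elif s[i] == 'T':
--             T_cnt += 1
--
--         if L_cnt + T_cnt > best_cnt:
--             best_cnt = L_cnt + T_cnt
--             best_i  = i
--
--     aC = f(s[:best_i] + 'C' + s[best_i:])[2][-1]
--
--     return max(aL, max(aT, aC))
--
-- s = "LLLTCTCT"
-- ===== SOURCE B (Python) =====
-- def numOfSubsequences(s: str) -> int:
--     # One forward pass computes all subsequence counts in closed form
--     # (L, LC, LCT, C, CT); the three DP-table rebuilds of the original
--     # are replaced by arithmetic gains: inserting 'L' in front adds CT,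
--     # inserting 'T' at the back adds LC, inserting 'C' at position i adds
--     # (#L before i) * (#T from i on).  The right-to-left best_i scan is
--     # kept exactly as in the original (strict '>', default best_i = -1).
--     t = [c for c in s if c in "LCT"]
--
--     L = lc = lct = C = ct = 0
--     for c in t:
--         if c == 'L':
--             L += 1
--         elif c == 'C':
--             lc += L
--             C += 1
--         else:  # 'T'
--             lct += lc
--             ct += C
--
--     best_cnt, best_i = 0, -1
--     L_left, T_right = L, 0
--     for i in range(len(t) - 1, -1, -1):
--         if t[i] == 'L':
--             L_left -= 1
--         elif t[i] == 'T':
--             T_right += 1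
--         if L_left + T_right > best_cnt:
--             best_cnt = L_left + T_right
--             best_i = i
--
--     pre, suf = t[:best_i], t[best_i:]
--     gain_c = sum(1 for c in pre if c == 'L') * sum(1 for c in suf if c == 'T')
--
--     return max(lct + ct, lct + lc, lct + gain_c)
-- ===== Notes on version B (the rewrite author's own statement) =====
-- stated objective: simpler
-- what changed: Replaces the three 3xN DP-table rebuilds (one per candidate insertion) by a single forward pass that computes the L/LC/LCT/C/CT subsequence counts in closed form, so each insertion's answer is base plus an arithmetic gain (CT, LC, or #L-before * #T-after at A's best_i); A's right-to-left best_i scan is kept verbatim (constant-factor speedup: no table allocation, one pass instead of three rebuilt strings/tables).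
import Mathlib
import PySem

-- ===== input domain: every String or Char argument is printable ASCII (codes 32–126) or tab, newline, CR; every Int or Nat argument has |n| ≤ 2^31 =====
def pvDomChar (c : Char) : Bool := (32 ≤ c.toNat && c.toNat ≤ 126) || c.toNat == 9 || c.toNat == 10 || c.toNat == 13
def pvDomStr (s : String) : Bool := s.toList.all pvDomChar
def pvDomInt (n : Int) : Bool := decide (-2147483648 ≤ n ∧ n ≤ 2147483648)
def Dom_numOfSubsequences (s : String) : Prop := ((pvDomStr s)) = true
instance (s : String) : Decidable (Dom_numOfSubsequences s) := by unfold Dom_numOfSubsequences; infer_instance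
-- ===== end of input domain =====

-- B replaces A's three DP-table rebuilds by one forward pass computing all
-- subsequence counts in closed form (objective: simpler); A's best_i scan kept verbatim.

-- ===== PORT A =====
-- first loop of A: collect the 'L'/'C'/'T' characters
def pvFilterA (s : List Char) : List Char :=
  s.foldl (fun ss c => if c ∈ (['L', 'C', 'T'] : List Char) then ss ++ [c] else ss) []

-- body of f's 'for i in range(1, n)' loop; dp = (dp[0], dp[1], dp[2]).
-- s[i] and dp[r][i-1] are read with getD: every call site has 0 ≤ i-1 < i < len s,
-- so getD is exact there (Python's plain index would raise only out of range).
def pvFStep (s : List Char) (dp : List Int × List Int × List Int) (i : Nat) :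
    List Int × List Int × List Int :=
  let c := s.getD i ' '
  if c = 'L' then
    (dp.1.set i (dp.1.getD (i-1) 0 + 1), dp.2.1.set i (dp.2.1.getD (i-1) 0),
     dp.2.2.set i (dp.2.2.getD (i-1) 0))
  else if c = 'C' then
    (dp.1.set i (dp.1.getD (i-1) 0), dp.2.1.set i (dp.2.1.getD (i-1) 0 + dp.1.getD (i-1) 0),
     dp.2.2.set i (dp.2.2.getD (i-1) 0))
  else if c = 'T' then
    (dp.1.set i (dp.1.getD (i-1) 0), dp.2.1.set i (dp.2.1.getD (i-1) 0),
     dp.2.2.set i (dp.2.2.getD (i-1) 0 + dp.2.1.getD (i-1) 0))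
  else dp

-- A's helper f: builds the 3×n table (s[0] read with getD; f is only called on nonempty strings)
def pvF (s : List Char) : List Int × List Int × List Int :=
  let n := s.length
  let dp : List Int × List Int × List Int :=
    (List.replicate n 0, List.replicate n 0, List.replicate n 0)
  let dp := if s.getD 0 ' ' = 'L' then (dp.1.set 0 (dp.1.getD 0 0 + 1), dp.2.1, dp.2.2) else dp
  (List.range' 1 (n - 1)).foldl (pvFStep s) dp

-- dp[2][-1] of f's result
def pvFLast (s : List Char) : Int := (PySem.List.pyGet? (pvF s).2.2 (-1)).getD 0

-- body of A's right-to-left best_i loop; state = (L_cnt, T_cnt, best_cnt, best_i)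
def pvBestStep (s : List Char) (st : Int × Int × Int × Int) (i : Nat) : Int × Int × Int × Int :=
  let c := s.getD i ' '
  let lt := if c = 'L' then (st.1 - 1, st.2.1)
            else if c = 'T' then (st.1, st.2.1 + 1) else (st.1, st.2.1)
  if lt.1 + lt.2 > st.2.2.1 then (lt.1, lt.2, lt.1 + lt.2, (i : Int))
  else (lt.1, lt.2, st.2.2.1, st.2.2.2)

def numOfSubsequences (s : String) : Int :=
  let ss := pvFilterA s.toList
  let aL := pvFLast ('L' :: ss)
  let aT := pvFLast (ss ++ ['T'])
  let lCnt : Int := (PySem.List.count ss 'L' : Int)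
  let st := ((List.range ss.length).reverse).foldl (pvBestStep ss) (lCnt, 0, 0, -1)
  let bestI := st.2.2.2
  let aC := pvFLast (PySem.List.slice ss none (some bestI) ++ 'C' ::
                     PySem.List.slice ss (some bestI) none)
  max aL (max aT aC)

-- ===== PORT B =====
-- forward pass of Source B; state = (L, lc, lct, C, ct)
def pvQuintStep (st : Int × Int × Int × Int × Int) (c : Char) : Int × Int × Int × Int × Int :=
  if c = 'L' then (st.1 + 1, st.2.1, st.2.2.1, st.2.2.2.1, st.2.2.2.2)
  else if c = 'C' then (st.1, st.2.1 + st.1, st.2.2.1, st.2.2.2.1 + 1, st.2.2.2.2)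
  else (st.1, st.2.1, st.2.2.1 + st.2.1, st.2.2.2.1, st.2.2.2.2 + st.2.2.2.1)

-- Source B's right-to-left best_i loop (same loop as A's); state = (L_left, T_right, best_cnt, best_i)
def pvBestStepB (t : List Char) (st : Int × Int × Int × Int) (i : Nat) : Int × Int × Int × Int :=
  let c := t.getD i ' '
  let lt := if c = 'L' then (st.1 - 1, st.2.1)
            else if c = 'T' then (st.1, st.2.1 + 1) else (st.1, st.2.1)
  if lt.1 + lt.2 > st.2.2.1 then (lt.1, lt.2, lt.1 + lt.2, (i : Int))
  else (lt.1, lt.2, st.2.2.1, st.2.2.2)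

def numOfSubsequences_alt (s : String) : Int :=
  let t := s.toList.filter (fun c => c = 'L' ∨ c = 'C' ∨ c = 'T')
  let q := t.foldl pvQuintStep (0, 0, 0, 0, 0)
  let st := ((List.range t.length).reverse).foldl (pvBestStepB t) (q.1, 0, 0, -1)
  let bestI := st.2.2.2
  let pre := PySem.List.slice t none (some bestI)
  let suf := PySem.List.slice t (some bestI) none
  let gain : Int := ((pre.countP (fun c => c = 'L')) : Int) * ((suf.countP (fun c => c = 'T')) : Int)
  max (q.2.2.1 + q.2.2.2.2) (max (q.2.2.1 + q.2.1) (q.2.2.1 + gain))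

-- ===== PRECONDITION & SPEC =====
def Spec_numOfSubsequences (s : String) (out : Int) : Prop := out = numOfSubsequences_alt s
instance (s : String) (out : Int) : Decidable (Spec_numOfSubsequences s out) := by
  unfold Spec_numOfSubsequences; infer_instance

-- ===== CLAIM (what is proved, stated in full; the proofs are below) =====
def Claim_equal_numOfSubsequences : Prop :=
  ∀ (s : String), Dom_numOfSubsequences s → Spec_numOfSubsequences s (numOfSubsequences s)

-- ===== LEMMAS AND PROOFS =====

-- the simple (L, LC, LCT) counting step A's dp table computes columnwise
def pvTripStep (st : Int × Int × Int) (c : Char) : Int × Int × Int :=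
  if c = 'L' then (st.1 + 1, st.2.1, st.2.2)
  else if c = 'C' then (st.1, st.2.1 + st.1, st.2.2)
  else if c = 'T' then (st.1, st.2.1, st.2.2 + st.2.1) else st

def pvCL (cs : List Char) : Int := ((cs.countP (fun c => c = 'L')) : Int)
def pvCC (cs : List Char) : Int := ((cs.countP (fun c => c = 'C')) : Int)
def pvCTc (cs : List Char) : Int := ((cs.countP (fun c => c = 'T')) : Int)

-- number of "CT" subsequences
def pvCT : List Char → Int
  | [] => 0
  | c :: cs => (if c = 'C' then pvCTc cs else 0) + pvCT cs

lemma pvFilterA_eq (l : List Char) :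
    pvFilterA l = l.filter (fun c => decide (c = 'L' ∨ c = 'C' ∨ c = 'T')) := by
  suffices h : ∀ acc, l.foldl (fun ss c => if c ∈ (['L','C','T'] : List Char) then ss ++ [c] else ss) acc
      = acc ++ l.filter (fun c => decide (c = 'L' ∨ c = 'C' ∨ c = 'T')) by
    simpa [pvFilterA] using h []
  induction l with
  | nil => simp
  | cons c cs ih =>
    intro acc
    rw [List.foldl_cons]
    by_cases hc : c = 'L' ∨ c = 'C' ∨ c = 'T'
    · have hm : c ∈ (['L','C','T'] : List Char) := by simpa using hc
      rw [if_pos hm, ih, List.filter_cons]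
      simp [hc]
    · have hm : c ∉ (['L','C','T'] : List Char) := by simpa using hc
      rw [if_neg hm, ih, List.filter_cons]
      simp [hc]

lemma trip_fst (cs : List Char) (a b d : Int) :
    (cs.foldl pvTripStep (a, b, d)).1 = a + pvCL cs := by
  induction cs generalizing a b d with
  | nil => simp [pvCL]
  | cons c cs ih =>
    by_cases h1 : c = 'L'
    · simp [pvTripStep, h1, ih, pvCL]; ring
    · by_cases h2 : c = 'C'
      · simp [pvTripStep, h2, ih, pvCL]
      · by_cases h3 : c = 'T' <;> simp [pvTripStep, h1, h2, h3, ih, pvCL]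

lemma trip_shift (cs : List Char) (a b d al be de : Int) :
    cs.foldl pvTripStep (a + al, b + be, d + de) =
      ((cs.foldl pvTripStep (a, b, d)).1 + al,
       (cs.foldl pvTripStep (a, b, d)).2.1 + be + al * pvCC cs,
       (cs.foldl pvTripStep (a, b, d)).2.2 + de + be * pvCTc cs + al * pvCT cs) := by
  induction cs generalizing a b d al be de with
  | nil => simp [pvCC, pvCTc, pvCT]
  | cons c cs ih =>
    rw [List.foldl_cons, List.foldl_cons]
    by_cases h1 : c = 'L'
    · subst h1
      have hs : ∀ st : Int × Int × Int, pvTripStep st 'L' = (st.1 + 1, st.2.1, st.2.2) := by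
        intro st; simp [pvTripStep]
      rw [hs, hs]
      rw [show ((a + al + 1, b + be, d + de) : Int × Int × Int)
            = ((a + 1) + al, b + be, d + de) by ring_nf, ih]
      simp [pvCC, pvCTc, pvCT]
    · by_cases h2 : c = 'C'
      · subst h2
        have hs : ∀ st : Int × Int × Int, pvTripStep st 'C' = (st.1, st.2.1 + st.1, st.2.2) := by
          intro st; simp [pvTripStep]
        rw [hs, hs]
        rw [show ((a + al, b + be + (a + al), d + de) : Int × Int × Int)
              = (a + al, (b + a) + (be + al), d + de) by ring_nf, ih]
        simp [pvCC, pvCTc, pvCT]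
        constructor <;> ring
      · by_cases h3 : c = 'T'
        · subst h3
          have hs : ∀ st : Int × Int × Int, pvTripStep st 'T' = (st.1, st.2.1, st.2.2 + st.2.1) := by
            intro st; simp [pvTripStep]
          rw [hs, hs]
          rw [show ((a + al, b + be, d + de + (b + be)) : Int × Int × Int)
                = (a + al, b + be, (d + b) + (de + be)) by ring_nf, ih]
          simp [pvCC, pvCTc, pvCT]
          ring
        · have hs : ∀ st : Int × Int × Int, pvTripStep st c = st := by
            intro st; simp [pvTripStep, h1, h2, h3]
          rw [hs, hs, ih]
          simp [pvCC, pvCTc, pvCT, h2, h3]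

-- the dp table after the 'if s[0]' initialisation
def pvInit (cs : List Char) : List Int × List Int × List Int :=
  let dp : List Int × List Int × List Int :=
    (List.replicate cs.length 0, List.replicate cs.length 0, List.replicate cs.length 0)
  if cs.getD 0 ' ' = 'L' then (dp.1.set 0 (dp.1.getD 0 0 + 1), dp.2.1, dp.2.2) else dp

lemma pvF_eq_foldl (cs : List Char) :
    pvF cs = (List.range' 1 (cs.length - 1)).foldl (pvFStep cs) (pvInit cs) := rfl

-- loop invariant of f's dp loop
def pvInv (cs : List Char) (m : Nat) (st : List Int × List Int × List Int) : Prop :=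
  st.1.length = cs.length ∧ st.2.1.length = cs.length ∧ st.2.2.length = cs.length ∧
  st.1.getD m 0 = ((cs.take (m+1)).foldl pvTripStep (0, 0, 0)).1 ∧
  st.2.1.getD m 0 = ((cs.take (m+1)).foldl pvTripStep (0, 0, 0)).2.1 ∧
  st.2.2.getD m 0 = ((cs.take (m+1)).foldl pvTripStep (0, 0, 0)).2.2

lemma pvF_inv (cs : List Char) (h : ∀ c ∈ cs, c = 'L' ∨ c = 'C' ∨ c = 'T')
    (m : Nat) (hm : m < cs.length) :
    pvInv cs m ((List.range' 1 m).foldl (pvFStep cs) (pvInit cs)) := by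
  induction m with
  | zero =>
    obtain ⟨c, rest, rfl⟩ : ∃ c rest, cs = c :: rest := by
      cases cs with
      | nil => simp at hm
      | cons c rest => exact ⟨c, rest, rfl⟩
    by_cases hc : c = 'L' <;>
      simp [pvInv, pvInit, pvTripStep, hc, List.getD_eq_getElem?_getD]
  | succ m ih =>
    have hm' : m < cs.length := Nat.lt_of_succ_lt hm
    obtain ⟨hl0, hl1, hl2, hg0, hg1, hg2⟩ := ih hm'
    simp only [List.getD_eq_getElem?_getD] at hg0 hg1 hg2
    rw [List.range'_1_concat, List.foldl_append, List.foldl_cons, List.foldl_nil]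
    set st := (List.range' 1 m).foldl (pvFStep cs) (pvInit cs) with hst
    have hidx : (1 + m) = m + 1 := by omega
    have hgetc : cs.getD (1 + m) ' ' = cs[m+1]'hm := by
      rw [hidx]; exact List.getD_eq_getElem _ _ hm
    have htake : cs.take (m+1+1) = cs.take (m+1) ++ [cs[m+1]'hm] :=
      List.take_succ_eq_append_getElem hm
    have hlt0 : m + 1 < st.1.length := by omega
    have hlt1 : m + 1 < st.2.1.length := by omega
    have hlt2 : m + 1 < st.2.2.length := by omega
    have hsub : 1 + m - 1 = m := by omega
    rcases h (cs[m+1]'hm) (List.getElem_mem hm) with hc | hc | hc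
    · have hstep : pvFStep cs st (1 + m) =
          (st.1.set (m+1) (st.1.getD m 0 + 1), st.2.1.set (m+1) (st.2.1.getD m 0),
           st.2.2.set (m+1) (st.2.2.getD m 0)) := by
        unfold pvFStep; rw [hgetc, hc]; simp [hidx]
      rw [hstep]
      refine ⟨by simp [hl0], by simp [hl1], by simp [hl2], ?_, ?_, ?_⟩ <;>
        rw [htake, List.foldl_append, List.foldl_cons, List.foldl_nil, hc] <;>
        simp [pvTripStep, hlt0, hlt1, hlt2, hg0, hg1, hg2]
    · have hstep : pvFStep cs st (1 + m) =
          (st.1.set (m+1) (st.1.getD m 0), st.2.1.set (m+1) (st.2.1.getD m 0 + st.1.getD m 0),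
           st.2.2.set (m+1) (st.2.2.getD m 0)) := by
        unfold pvFStep; rw [hgetc, hc]; simp [hidx]
      rw [hstep]
      refine ⟨by simp [hl0], by simp [hl1], by simp [hl2], ?_, ?_, ?_⟩ <;>
        rw [htake, List.foldl_append, List.foldl_cons, List.foldl_nil, hc] <;>
        simp [pvTripStep, hlt0, hlt1, hlt2, hg0, hg1, hg2]
    · have hstep : pvFStep cs st (1 + m) =
          (st.1.set (m+1) (st.1.getD m 0), st.2.1.set (m+1) (st.2.1.getD m 0),
           st.2.2.set (m+1) (st.2.2.getD m 0 + st.2.1.getD m 0)) := by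
        unfold pvFStep; rw [hgetc, hc]; simp [hidx]
      rw [hstep]
      refine ⟨by simp [hl0], by simp [hl1], by simp [hl2], ?_, ?_, ?_⟩ <;>
        rw [htake, List.foldl_append, List.foldl_cons, List.foldl_nil, hc] <;>
        simp [pvTripStep, hlt0, hlt1, hlt2, hg0, hg1, hg2]

-- A's dp table characterisation
lemma pvFLast_eq (cs : List Char) (hne : cs ≠ [])
    (h : ∀ c ∈ cs, c = 'L' ∨ c = 'C' ∨ c = 'T') :
    pvFLast cs = (cs.foldl pvTripStep (0, 0, 0)).2.2 := by
  have hn : 1 ≤ cs.length := List.length_pos_iff.mpr hne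
  have hm : cs.length - 1 < cs.length := by omega
  obtain ⟨hl0, hl1, hl2, hg0, hg1, hg2⟩ := pvF_inv cs h (cs.length - 1) hm
  unfold pvFLast
  rw [pvF_eq_foldl]
  have hlen : ((List.range' 1 (cs.length - 1)).foldl (pvFStep cs) (pvInit cs)).2.2.length
      = cs.length := hl2
  have hne2 : ((List.range' 1 (cs.length - 1)).foldl (pvFStep cs) (pvInit cs)).2.2 ≠ [] := by
    intro hcon; rw [hcon] at hlen; simp at hlen; omega
  have h1 : 1 ≤ ((List.range' 1 (cs.length - 1)).foldl (pvFStep cs) (pvInit cs)).2.2.length :=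
    List.length_pos_iff.mpr hne2
  have key := hg2
  rw [show cs.length - 1 + 1 = cs.length by omega, List.take_length] at key
  have hred : (PySem.List.pyGet?
        ((List.range' 1 (cs.length - 1)).foldl (pvFStep cs) (pvInit cs)).2.2 (-1)).getD 0
      = ((List.range' 1 (cs.length - 1)).foldl (pvFStep cs) (pvInit cs)).2.2.getD
          (((List.range' 1 (cs.length - 1)).foldl (pvFStep cs) (pvInit cs)).2.2.length - 1) 0 := by
    simp [PySem.List.pyGet?, PySem.List.pyIdx?, h1, List.getD_eq_getElem?_getD]
  rw [hred, hlen]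
  exact key

lemma quint_eq (cs : List Char) (h : ∀ c ∈ cs, c = 'L' ∨ c = 'C' ∨ c = 'T')
    (a b d x y : Int) :
    cs.foldl pvQuintStep (a, b, d, x, y) =
      ((cs.foldl pvTripStep (a, b, d)).1, (cs.foldl pvTripStep (a, b, d)).2.1,
       (cs.foldl pvTripStep (a, b, d)).2.2, x + pvCC cs, y + x * pvCTc cs + pvCT cs) := by
  induction cs generalizing a b d x y with
  | nil => simp [pvCC, pvCTc, pvCT]
  | cons c cs ih =>
    have hcs : ∀ c ∈ cs, c = 'L' ∨ c = 'C' ∨ c = 'T' := fun c hc => h c (List.mem_cons_of_mem _ hc)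
    rw [List.foldl_cons, List.foldl_cons]
    have ihx := ih hcs
    rcases h c List.mem_cons_self with h1 | h2 | h3
    · subst h1
      rw [show pvQuintStep (a, b, d, x, y) 'L' = (a + 1, b, d, x, y) from rfl,
          show pvTripStep (a, b, d) 'L' = (a + 1, b, d) from rfl, ihx _ _ _ _ _]
      simp [pvCC, pvCTc, pvCT]
    · subst h2
      rw [show pvQuintStep (a, b, d, x, y) 'C' = (a, b + a, d, x + 1, y) from rfl,
          show pvTripStep (a, b, d) 'C' = (a, b + a, d) from rfl, ihx _ _ _ _ _]
      simp [pvCC, pvCTc, pvCT]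
      exact ⟨by ring, by ring⟩
    · subst h3
      rw [show pvQuintStep (a, b, d, x, y) 'T' = (a, b, d + b, x, y + x) from rfl,
          show pvTripStep (a, b, d) 'T' = (a, b, d + b) from rfl, ihx _ _ _ _ _]
      simp [pvCC, pvCTc, pvCT]
      ring

-- best_i of the scan is -1 or a valid index
lemma foldl_preserve {α β : Type} (P : β → Prop) (f : β → α → β) (l : List α) (init : β)
    (hstep : ∀ st x, x ∈ l → P st → P (f st x)) (hinit : P init) : P (l.foldl f init) := by
  induction l generalizing init with
  | nil => exact hinit
  | cons x xs ih =>
    exact ih _ (fun st y hy => hstep st y (List.mem_cons_of_mem _ hy))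
      (hstep init x List.mem_cons_self hinit)

lemma best_range (cs : List Char) (init : Int × Int × Int × Int)
    (hinit : init.2.2.2 = -1 ∨ (0 ≤ init.2.2.2 ∧ init.2.2.2 < (cs.length : Int))) :
    (((List.range cs.length).reverse).foldl (pvBestStep cs) init).2.2.2 = -1 ∨
      (0 ≤ (((List.range cs.length).reverse).foldl (pvBestStep cs) init).2.2.2 ∧
       (((List.range cs.length).reverse).foldl (pvBestStep cs) init).2.2.2 < (cs.length : Int)) := by
  refine foldl_preserve (fun st => st.2.2.2 = -1 ∨ (0 ≤ st.2.2.2 ∧ st.2.2.2 < (cs.length : Int)))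
    (pvBestStep cs) _ init ?_ hinit
  intro st i hi hst
  have hilt : i < cs.length := by
    have := List.mem_reverse.mp hi
    simpa using List.mem_range.mp this
  unfold pvBestStep
  dsimp only
  split_ifs <;> dsimp only <;>
    first
      | exact hst
      | (right; exact ⟨Int.natCast_nonneg i, by exact_mod_cast hilt⟩)

lemma slice_split (cs : List Char) (i : Int)
    (hi : i = -1 ∨ (0 ≤ i ∧ i < (cs.length : Int))) :
    PySem.List.slice cs none (some i) ++ PySem.List.slice cs (some i) none = cs := by
  rcases hi with h | ⟨h0, hlt⟩
  · subst h
    rw [PySem.List.slice_to_neg_one cs, PySem.List.slice_from_neg_one cs]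
    rw [List.dropLast_eq_take]
    exact List.take_append_drop _ _
  · rw [PySem.List.slice_to cs h0, PySem.List.slice_from cs h0]
    exact List.take_append_drop _ _

-- ===== VERDICT (by name: the statement is the Claim_ definition above) =====
theorem numOfSubsequences_spec : Claim_equal_numOfSubsequences := by
  intro s _
  show numOfSubsequences s = numOfSubsequences_alt s
  unfold numOfSubsequences numOfSubsequences_alt
  simp only [pvFilterA_eq]
  set t := s.toList.filter (fun c => decide (c = 'L' ∨ c = 'C' ∨ c = 'T')) with ht
  have hall : ∀ c ∈ t, c = 'L' ∨ c = 'C' ∨ c = 'T' := by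
    intro c hc
    simpa using (List.mem_filter.mp hc).2
  set r := t.foldl pvTripStep (0, 0, 0) with hr
  have hq := quint_eq t hall 0 0 0 0 0
  rw [← hr] at hq
  rw [hq]
  dsimp only
  have hbsb : pvBestStepB = pvBestStep := rfl
  rw [hbsb]
  have hcount : ((PySem.List.count t 'L' : Nat) : Int) = r.1 := by
    rw [hr, trip_fst t 0 0 0]
    simp [PySem.List.count_eq, pvCL, List.count_eq_countP]
    congr 1
  rw [hcount]
  set bi := (List.foldl (pvBestStep t) (r.1, 0, 0, -1) (List.range t.length).reverse).2.2.2
    with hbi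
  have hbir : bi = -1 ∨ (0 ≤ bi ∧ bi < (t.length : Int)) := by
    rw [hbi]
    exact best_range t (r.1, 0, 0, -1) (Or.inl rfl)
  set pre := PySem.List.slice t none (some bi) with hpre
  set suf := PySem.List.slice t (some bi) none with hsuf
  have hps : pre ++ suf = t := slice_split t bi hbir
  have hallL : ∀ c ∈ 'L' :: t, c = 'L' ∨ c = 'C' ∨ c = 'T' := by
    intro c hc
    rcases List.mem_cons.mp hc with h | h
    · exact Or.inl h
    · exact hall c h
  have hallT : ∀ c ∈ t ++ ['T'], c = 'L' ∨ c = 'C' ∨ c = 'T' := by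
    intro c hc
    rcases List.mem_append.mp hc with h | h
    · exact hall c h
    · simp at h; subst h; right; right; rfl
  have hallC : ∀ c ∈ pre ++ 'C' :: suf, c = 'L' ∨ c = 'C' ∨ c = 'T' := by
    intro c hc
    rcases List.mem_append.mp hc with h | h
    · exact hall c (by rw [← hps]; exact List.mem_append.mpr (Or.inl h))
    · rcases List.mem_cons.mp h with h | h
      · right; left; exact h
      · exact hall c (by rw [← hps]; exact List.mem_append.mpr (Or.inr h))
  have haL : pvFLast ('L' :: t) = r.2.2 + pvCT t := by
    rw [pvFLast_eq _ (by simp) hallL, List.foldl_cons,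
        show pvTripStep (0, 0, 0) 'L' = ((0 : Int) + 1, (0 : Int) + 0, (0 : Int) + 0) by
          norm_num [pvTripStep],
        trip_shift t 0 0 0 1 0 0, ← hr]
    ring
  have haT : pvFLast (t ++ ['T']) = r.2.2 + r.2.1 := by
    rw [pvFLast_eq _ (by simp) hallT, List.foldl_append, List.foldl_cons, List.foldl_nil, ← hr]
    simp [pvTripStep]
  have haC : pvFLast (pre ++ 'C' :: suf) = r.2.2 + pvCL pre * pvCTc suf := by
    rw [pvFLast_eq _ (by simp) hallC, List.foldl_append, List.foldl_cons]
    set p := pre.foldl pvTripStep (0, 0, 0) with hp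
    rw [show pvTripStep p 'C' = (p.1 + 0, p.2.1 + p.1, p.2.2 + 0) by simp [pvTripStep],
        trip_shift suf p.1 p.2.1 p.2.2 0 p.1 0]
    have hfull : suf.foldl pvTripStep (p.1, p.2.1, p.2.2) = r := by
      rw [hr, ← hps, List.foldl_append, ← hp]
    rw [hfull]
    have hp1 : p.1 = pvCL pre := by rw [hp, trip_fst pre 0 0 0]; ring
    rw [hp1]
    ring
  rw [haL, haT, haC]
  simp only [pvCL, pvCTc]
  ring_nf
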